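-- pv_equiv track=rewrite | github.com/bcgov/gwa-api | microservices/gatewayJobScheduler/main.py | get_select_tag
-- ===== SOURCE A (Python) =====
-- def get_select_tag(tags):
--     qualifiers = ['dev', 'test', 'prod']
--     valid_select_tags = []
--     required_tag = None
--     for tag in tags:
--         if tag.startswith("ns."):
--             required_tag = tag
--             if len(tag.split(".")) > 2:
--                 required_tag = tag
--                 break
--     return required_tag
-- ===== SOURCE B (Python) =====
-- def get_select_tag(tags):
--     long = None
--     last = None
--     for t in reversed(tags):
--         if t.startswith("ns."):
--             if len(t.split(".")) > 2:
--                 long = t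
--             if last is None:
--                 last = t
--     return long if long is not None else last
-- ===== Notes on version B (the rewrite author's own statement) =====
-- stated objective: alternative
-- what changed: Traverses the list back-to-front with a (first-long, last-ns) pair accumulator and no early break, combining the two candidates at the end, instead of A's forward early-breaking loop with a single overwritten accumulator.
import Mathlib
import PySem

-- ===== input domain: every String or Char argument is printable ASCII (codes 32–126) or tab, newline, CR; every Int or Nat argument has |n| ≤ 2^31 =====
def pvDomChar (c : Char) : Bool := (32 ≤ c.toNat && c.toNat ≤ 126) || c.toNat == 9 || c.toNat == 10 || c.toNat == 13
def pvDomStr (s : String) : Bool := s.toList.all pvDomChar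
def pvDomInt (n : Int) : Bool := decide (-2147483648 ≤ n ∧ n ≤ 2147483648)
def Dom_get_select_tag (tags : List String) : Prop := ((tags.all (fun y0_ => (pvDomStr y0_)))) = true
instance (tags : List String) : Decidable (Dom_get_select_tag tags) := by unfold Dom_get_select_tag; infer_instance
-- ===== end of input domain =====

-- ===== PORT A =====
-- B traverses back-to-front with a (first-long, last-ns) pair accumulator; alternative decomposition, same cost.
def getSelectTagGo (req : Option String) : List String → Option String
  | [] => req
  | t :: ts =>
    if PySem.Chars.startswith t.toList ['n', 's', '.'] then
      if (PySem.Chars.splitOn t.toList ['.']).length > 2 then some t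
      else getSelectTagGo (some t) ts
    else getSelectTagGo req ts

def get_select_tag (tags : List String) : Option String :=
  getSelectTagGo none tags

-- ===== PORT B =====
def altStep (acc : Option String × Option String) (t : String) : Option String × Option String :=
  if PySem.Chars.startswith t.toList ['n', 's', '.'] then
    ((if (PySem.Chars.splitOn t.toList ['.']).length > 2 then some t else acc.1),
     acc.2.or (some t))
  else acc

def get_select_tag_alt (tags : List String) : Option String :=
  let p := tags.reverse.foldl altStep (none, none)
  p.1.or p.2

-- ===== PRECONDITION & SPEC =====
def Spec_get_select_tag (tags : List String) (out : Option String) : Prop := out = get_select_tag_alt tags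
instance (tags : List String) (out : Option String) : Decidable (Spec_get_select_tag tags out) := by unfold Spec_get_select_tag; infer_instance

-- ===== CLAIM (what is proved, stated in full; the proofs are below) =====
def Claim_equal_get_select_tag : Prop := ∀ (tags : List String), Dom_get_select_tag tags → Spec_get_select_tag tags (get_select_tag tags)

-- ===== LEMMAS AND PROOFS =====
theorem getSelectTagGo_eq (ts : List String) : ∀ (req : Option String),
    getSelectTagGo req ts =
      (let p := ts.foldr (fun t acc => altStep acc t) (none, none)
       p.1.or (p.2.or req)) := by
  induction ts with
  | nil => intro req; simp [getSelectTagGo]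
  | cons t ts ih =>
    intro req
    simp only [List.foldr_cons]
    by_cases hns : PySem.Chars.startswith t.toList ['n', 's', '.'] = true
    · by_cases hlong : (PySem.Chars.splitOn t.toList ['.']).length > 2
      · simp [getSelectTagGo, hns, hlong, altStep]
      · simp only [getSelectTagGo, if_pos hns, if_neg hlong]
        rw [ih (some t)]
        simp only [altStep, if_pos hns, if_neg hlong]
        rw [Option.or_assoc, Option.some_or]
    · simp only [getSelectTagGo, if_neg hns]
      rw [ih]
      simp only [altStep, if_neg hns]

-- ===== VERDICT (by name: the statement is the Claim_ definition above) =====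
theorem get_select_tag_spec : Claim_equal_get_select_tag := by
  intro tags _
  show getSelectTagGo none tags = get_select_tag_alt tags
  rw [getSelectTagGo_eq]
  simp only [get_select_tag_alt, List.foldl_reverse, Option.or_none]
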